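-- pv_equiv track=rewrite | github.com/wherby/code | contest/00000c443d154/d155/q2/t2 copy.py | baseUnitConversions
-- ===== SOURCE A (Python) =====
-- from typing import List, Tuple, Optional
--
-- def baseUnitConversions(conversions: List[List[int]]) -> List[int]:
--     mod = 10**9+7
--     n = len(conversions)+1
--     ret = [-1]*n
--     g = [[] for _ in range(n)]
--     for a,b,c in conversions:
--         g[a].append((b,c))
--
--     def dfs(idx,acc):
--         if ret[idx] != -1:
--             return
--         ret[idx] = acc%mod
--         for b,c in g[idx]:
--             if ret[b] ==-1:
--                 dfs(b,c*acc)
--     dfs(0,1)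
--     return ret
-- ===== SOURCE B (Python) =====
-- from typing import List
--
-- def baseUnitConversions(conversions: List[List[int]]) -> List[int]:
--     mod = 10**9 + 7
--     n = len(conversions) + 1
--     g = [[] for _ in range(n)]
--     for a, b, c in conversions:
--         g[a].append((b, c))
--     ret = [-1] * n
--     stack = [(0, 1)]
--     while stack:
--         idx, acc = stack.pop()
--         if ret[idx] != -1:
--             continue
--         ret[idx] = acc % mod
--         for b, c in reversed(g[idx]):
--             stack.append((b, c * acc))
--     return ret
-- ===== Notes on version B (the rewrite author's own statement) =====
-- stated objective: alternative
-- what changed: The recursive dfs (with its per-child revisit guard) is replaced by an iterative explicit-stack DFS that pushes each node's outgoing edges in reverse order and filters already-visited nodes at pop time, reproducing the recursive preorder without recursion.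
import Mathlib
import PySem

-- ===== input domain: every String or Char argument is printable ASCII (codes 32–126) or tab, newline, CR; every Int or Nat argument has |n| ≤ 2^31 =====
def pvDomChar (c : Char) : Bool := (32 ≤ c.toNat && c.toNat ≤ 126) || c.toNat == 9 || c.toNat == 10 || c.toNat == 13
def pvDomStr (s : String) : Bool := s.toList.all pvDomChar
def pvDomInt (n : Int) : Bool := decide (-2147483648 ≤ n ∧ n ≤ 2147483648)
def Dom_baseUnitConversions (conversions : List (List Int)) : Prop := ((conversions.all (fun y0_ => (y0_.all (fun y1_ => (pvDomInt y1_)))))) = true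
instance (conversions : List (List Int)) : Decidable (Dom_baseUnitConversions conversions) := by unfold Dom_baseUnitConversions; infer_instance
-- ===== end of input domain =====

-- B replaces A's recursive dfs by an explicit-stack iterative DFS over the same adjacency
-- list, visiting nodes in the same preorder; an alternative decomposition, no speed claim.


def pvMod : Int := 10 ^ 9 + 7

-- shared by both ports: both Pythons build the adjacency list g with the same loop
-- 'for a,b,c in conversions: g[a].append((b,c))' (a row of length ≠ 3 raises in Python
-- and is excluded by Pre_; the catch-all match arm is unreachable there)
def pvBuildG (n : Nat) (conversions : List (List Int)) : List (List (Int × Int)) :=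
  conversions.foldl
    (fun g row =>
      match row with
      | [a, b, c] => PySem.List.pySetD g a (PySem.List.pyGetD g a [] ++ [(b, c)])
      | _ => g)
    (List.replicate n [])

-- termination helpers for the ports (cited by name in decreasing_by)
theorem pvCount_set_lt (l : List Int) (k : Nat) (v b : Int) (h : l[k]? = some b)
    (hv : v ≠ b) : (l.set k v).count b < l.count b := by
  induction l generalizing k with
  | nil => simp at h
  | cons x xs ih =>
    cases k with
    | zero => simp_all
    | succ k => simp_all [List.count_cons]

theorem pvCount_pySetD_lt (ret : List Int) (i v : Int)
    (h : PySem.List.pyGetD ret i 0 = -1) (hv : v ≠ -1) :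
    (PySem.List.pySetD ret i v).count (-1) < ret.count (-1) := by
  unfold PySem.List.pyGetD PySem.List.pyGet? PySem.List.pySetD PySem.List.pySet? at *
  cases hk : PySem.List.pyIdx? ret.length i with
  | none => simp [hk] at h
  | some k =>
    simp [hk] at h ⊢
    cases hg : ret[k]? with
    | none => simp [hg] at h
    | some x => simp [hg] at h; subst h; exact pvCount_set_lt ret k v (-1) hg hv

theorem pvModM_ne_neg_one (acc : Int) : PySem.Int.mod acc pvMod ≠ -1 := by
  have := PySem.Int.mod_nonneg acc (b := pvMod) (by norm_num [pvMod])
  omega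

-- ===== PORT A =====
-- A's recursive dfs; fuel bounds the recursion depth: every recursion level turns one '-1'
-- cell into a non-'-1' value before recursing, so fuel = n (the number of cells) is never
-- exhausted — the equivalence proof below goes through any fuel ≥ ret.count (-1).
mutual
def dfsA (g : List (List (Int × Int))) : Nat → Int → Int → List Int → List Int
  | 0, _, _, ret => ret
  | fuel + 1, idx, acc, ret =>
    if PySem.List.pyGetD ret idx 0 ≠ -1 then ret
    else dfsChildrenA g fuel (PySem.List.pyGetD g idx []) acc
           (PySem.List.pySetD ret idx (PySem.Int.mod acc pvMod))
  termination_by fuel _ _ _ => (fuel, 0)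

def dfsChildrenA (g : List (List (Int × Int))) (fuel : Nat) :
    List (Int × Int) → Int → List Int → List Int
  | [], _, ret => ret
  | (b, c) :: rest, acc, ret =>
    dfsChildrenA g fuel rest acc
      (if PySem.List.pyGetD ret b 0 = -1 then dfsA g fuel b (c * acc) ret else ret)
  termination_by children _ _ => (fuel, children.length + 1)
end

def baseUnitConversions (conversions : List (List Int)) : List Int :=
  let n := conversions.length + 1
  let g := pvBuildG n conversions
  dfsA g n 0 1 (List.replicate n (-1))

-- ===== PORT B =====
-- Source B's while-stack loop; the stack's top is the list head (Python appends reversed(g[idx])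
-- to the end and pops from the end, which is exactly prepending g[idx] in order here).
def loopB (g : List (List (Int × Int))) : List (Int × Int) → List Int → List Int
  | [], ret => ret
  | (idx, acc) :: stack, ret =>
    if PySem.List.pyGetD ret idx 0 ≠ -1 then loopB g stack ret
    else
      loopB g ((PySem.List.pyGetD g idx []).map (fun bc => (bc.1, bc.2 * acc)) ++ stack)
        (PySem.List.pySetD ret idx (PySem.Int.mod acc pvMod))
  termination_by stack ret => (ret.count (-1), stack.length)
  decreasing_by
  · exact Prod.Lex.right _ (Nat.lt_succ_self _)
  · exact Prod.Lex.left _ _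
      (pvCount_pySetD_lt ret idx _ (not_ne_iff.mp (by assumption)) (pvModM_ne_neg_one acc))

def baseUnitConversions_alt (conversions : List (List Int)) : List Int :=
  let n := conversions.length + 1
  let g := pvBuildG n conversions
  loopB g [(0, 1)] (List.replicate n (-1))

-- ===== PRECONDITION & SPEC =====
-- Python's negative-index wraparound: node identity of an in-range index i
def pvNorm (n : Nat) (i : Int) : Int := if i < 0 then i + n else i

-- the set of nodes reachable from node 0 along in-range edges of the input graph —
-- a property of the input graph (a plain transitive closure, not a run of either port):
-- these are exactly the nodes whose edge lists the Python programs examine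
def pvReach (conversions : List (List Int)) : List Int :=
  let n := conversions.length + 1
  (List.range n).foldl
    (fun s _ =>
      conversions.foldl
        (fun s row =>
          match row with
          | [a, b, _] =>
            if pvNorm n a ∈ s ∧ -(n : Int) ≤ b ∧ b < n ∧ pvNorm n b ∉ s
            then s ++ [pvNorm n b] else s
          | _ => s)
        s)
    [0]

-- Pre_ excludes exactly the inputs on which Python A raises: a row not of length 3
-- (ValueError at unpacking), a source index a outside [-n,n) (IndexError at g[a].append),
-- or a target index b outside [-n,n) on a row whose source node is reachable from 0
-- (IndexError at ret[b] when that node's edges are examined).  An out-of-range b on an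
-- UNREACHED row stays inside Pre_ (A returns normally there), as do negative in-range
-- indices (Python wraparound).
def Pre_baseUnitConversions (conversions : List (List Int)) : Prop :=
  ∀ row ∈ conversions, row.length = 3 ∧
    (-((conversions.length : Int) + 1) ≤ PySem.List.pyGetD row 0 0 ∧
      PySem.List.pyGetD row 0 0 < (conversions.length : Int) + 1) ∧
    ((-((conversions.length : Int) + 1) ≤ PySem.List.pyGetD row 1 0 ∧
        PySem.List.pyGetD row 1 0 < (conversions.length : Int) + 1) ∨
      pvNorm (conversions.length + 1) (PySem.List.pyGetD row 0 0) ∉ pvReach conversions)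
instance (conversions : List (List Int)) : Decidable (Pre_baseUnitConversions conversions) := by
  unfold Pre_baseUnitConversions; infer_instance

def pvWitness_baseUnitConversions : List (List Int) := [[0, 1, 2]]

def Spec_baseUnitConversions (conversions : List (List Int)) (out : List Int) : Prop := out = baseUnitConversions_alt conversions
instance (conversions : List (List Int)) (out : List Int) : Decidable (Spec_baseUnitConversions conversions out) := by unfold Spec_baseUnitConversions; infer_instance

-- ===== CLAIM (what is proved, stated in full; the proofs are below) =====
def Claim_equal_baseUnitConversions : Prop := ∀ (conversions : List (List Int)), Dom_baseUnitConversions conversions → Pre_baseUnitConversions conversions → Spec_baseUnitConversions conversions (baseUnitConversions conversions)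

-- ===== LEMMAS AND PROOFS =====
-- (the stack simulation below holds for every input, so Pre_ is not needed by the proof;
-- it marks where the PYTHON A raises, which the totalised PySem ports do not)

theorem pvCount_pos (ret : List Int) (i : Int) (h : PySem.List.pyGetD ret i 0 = -1) :
    0 < ret.count (-1) := by
  unfold PySem.List.pyGetD PySem.List.pyGet? at h
  cases hk : PySem.List.pyIdx? ret.length i with
  | none => simp [hk] at h
  | some k =>
    simp [hk] at h
    cases hg : ret[k]? with
    | none => simp [hg] at h
    | some x =>
      simp [hg] at h; subst h
      exact List.count_pos_iff.mpr (List.mem_of_getElem? hg)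

theorem pvDfsA_visited (g : List (List (Int × Int))) (f : Nat) (idx acc : Int)
    (ret : List Int) (h : PySem.List.pyGetD ret idx 0 ≠ -1) : dfsA g f idx acc ret = ret := by
  cases f <;> simp [dfsA, h]

-- dfs never increases the number of unvisited (-1) cells
theorem pvDfsA_count_le (g : List (List (Int × Int))) :
    ∀ f idx acc (ret : List Int), (dfsA g f idx acc ret).count (-1) ≤ ret.count (-1) := by
  intro f
  induction f with
  | zero => intro idx acc ret; simp [dfsA]
  | succ f ih =>
    have hc : ∀ (children : List (Int × Int)) acc (ret : List Int),
        (dfsChildrenA g f children acc ret).count (-1) ≤ ret.count (-1) := by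
      intro children
      induction children with
      | nil => intro acc ret; simp [dfsChildrenA]
      | cons bc rest ihc =>
        intro acc ret
        obtain ⟨b, c⟩ := bc
        rw [dfsChildrenA]
        refine le_trans (ihc acc _) ?_
        split
        · exact ih b (c * acc) ret
        · exact le_refl _
    intro idx acc ret
    rw [dfsA]
    split
    · exact le_refl _
    · rename_i h
      refine le_trans (hc _ acc _) (le_of_lt ?_)
      exact pvCount_pySetD_lt ret idx _ (not_ne_iff.mp h) (pvModM_ne_neg_one acc)

-- the stack simulation: popping (idx, acc) from B's stack has the same effect on ret
-- as A's recursive call dfs(idx, acc), for any fuel covering the unvisited cells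
theorem pvSIM (g : List (List (Int × Int))) :
    ∀ k (ret : List Int), ret.count (-1) ≤ k →
      ∀ (idx acc : Int) (stack : List (Int × Int)) (f : Nat), ret.count (-1) ≤ f →
        loopB g ((idx, acc) :: stack) ret = loopB g stack (dfsA g f idx acc ret) := by
  intro k
  induction k with
  | zero =>
    intro ret h0 idx acc stack f _
    have hv : PySem.List.pyGetD ret idx 0 ≠ -1 := fun hh =>
      absurd (pvCount_pos ret idx hh) (by omega)
    rw [loopB, pvDfsA_visited g f idx acc ret hv, if_pos hv]
  | succ k ih =>
    intro ret hk idx acc stack f hf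
    by_cases hv : PySem.List.pyGetD ret idx 0 ≠ -1
    · rw [loopB, pvDfsA_visited g f idx acc ret hv, if_pos hv]
    · have hv' : PySem.List.pyGetD ret idx 0 = -1 := not_ne_iff.mp hv
      have hpos := pvCount_pos ret idx hv'
      obtain ⟨f', rfl⟩ : ∃ f', f = f' + 1 := ⟨f - 1, by omega⟩
      rw [loopB, if_neg hv, dfsA, if_neg hv]
      have h1 : (PySem.List.pySetD ret idx (PySem.Int.mod acc pvMod)).count (-1)
          < ret.count (-1) := pvCount_pySetD_lt ret idx _ hv' (pvModM_ne_neg_one acc)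
      have key : ∀ (children : List (Int × Int)) (st : List (Int × Int)) (r : List Int),
          r.count (-1) ≤ k → r.count (-1) ≤ f' →
          loopB g (children.map (fun bc => (bc.1, bc.2 * acc)) ++ st) r
            = loopB g st (dfsChildrenA g f' children acc r) := by
        intro children
        induction children with
        | nil => intro st r _ _; rw [dfsChildrenA]; simp
        | cons bc rest ihc =>
          intro st r hrk hrf
          obtain ⟨b, c⟩ := bc
          simp only [List.map_cons, List.cons_append]
          rw [ih r hrk b (c * acc) _ f' hrf, dfsChildrenA]
          have hstep : (if PySem.List.pyGetD r b 0 = -1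
              then dfsA g f' b (c * acc) r else r) = dfsA g f' b (c * acc) r := by
            split
            · rfl
            · exact (pvDfsA_visited g f' b (c * acc) r (by assumption)).symm
          rw [hstep]
          exact ihc st (dfsA g f' b (c * acc) r)
            (le_trans (pvDfsA_count_le g f' b (c * acc) r) hrk)
            (le_trans (pvDfsA_count_le g f' b (c * acc) r) hrf)
      exact key _ stack _ (by omega) (by omega)

-- ===== VERDICT (by name: the statement is the Claim_ definition above) =====
theorem baseUnitConversions_spec : Claim_equal_baseUnitConversions := by
  intro conversions _ _
  unfold Spec_baseUnitConversions baseUnitConversions baseUnitConversions_alt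
  have hcnt : (List.replicate (conversions.length + 1) (-1 : Int)).count (-1)
      = conversions.length + 1 := by simp
  rw [pvSIM (pvBuildG (conversions.length + 1) conversions) (conversions.length + 1)
      _ (by omega) 0 1 [] (conversions.length + 1) (by omega), loopB]
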